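-- pv_equiv track=rewrite | github.com/Brendaqv/MapDrop | senamhi_stations.py | buscar_estaciones
-- ===== SOURCE A (Python) =====
-- def buscar_estaciones(query: str, estaciones: list, max_results: int = 10) -> list:
--     """
--     Busca estaciones por nombre o código.
--     Retorna lista de matches ordenados por relevancia.
--     """
--     if not query or len(query) < 2:
--         return []
--
--     query_upper = query.upper().strip()
--     exactos = []
--     parciales = []
--
--     for e in estaciones:
--         nombre = e.get('nom', '').upper()
--         codigo = e.get('cod', '').upper()
--         codigo_old = e.get('cod_old', '').upper()
--
--         # Match exacto de código
--         if codigo == query_upper or codigo_old == query_upper: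
--             exactos.append(e)
--         # Match al inicio del nombre
--         elif nombre.startswith(query_upper):
--             exactos.append(e)
--         # Match parcial en nombre
--         elif query_upper in nombre:
--             parciales.append(e)
--
--     results = exactos + parciales
--     return results[:max_results]
-- ===== SOURCE B (Python) =====
-- def buscar_estaciones(query: str, estaciones: list, max_results: int = 10) -> list:
--     """Single pass: rank each station (0 = exact/prefix, 1 = partial), keep matches,
--     then stable-sort by rank and slice."""
--     if not query or len(query) < 2:
--         return []
--
--     query_upper = query.upper().strip()
--
--     def rank(e):
--         nombre = e.get('nom', '').upper()
--         if (e.get('cod', '').upper() == query_upper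
--                 or e.get('cod_old', '').upper() == query_upper
--                 or nombre.startswith(query_upper)):
--             return 0
--         if query_upper in nombre:
--             return 1
--         return 2
--
--     matched = [e for e in estaciones if rank(e) < 2]
--     return sorted(matched, key=rank)[:max_results]
-- ===== Notes on version B (the rewrite author's own statement) =====
-- stated objective: alternative
-- what changed: Replaces A's two accumulator buckets (exactos/parciales built in one loop, then concatenated) by a one-pass rank-and-filter (rank 0 = exact code or name-prefix match, 1 = partial name match) followed by a stable sort on the rank before slicing.
import Mathlib
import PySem

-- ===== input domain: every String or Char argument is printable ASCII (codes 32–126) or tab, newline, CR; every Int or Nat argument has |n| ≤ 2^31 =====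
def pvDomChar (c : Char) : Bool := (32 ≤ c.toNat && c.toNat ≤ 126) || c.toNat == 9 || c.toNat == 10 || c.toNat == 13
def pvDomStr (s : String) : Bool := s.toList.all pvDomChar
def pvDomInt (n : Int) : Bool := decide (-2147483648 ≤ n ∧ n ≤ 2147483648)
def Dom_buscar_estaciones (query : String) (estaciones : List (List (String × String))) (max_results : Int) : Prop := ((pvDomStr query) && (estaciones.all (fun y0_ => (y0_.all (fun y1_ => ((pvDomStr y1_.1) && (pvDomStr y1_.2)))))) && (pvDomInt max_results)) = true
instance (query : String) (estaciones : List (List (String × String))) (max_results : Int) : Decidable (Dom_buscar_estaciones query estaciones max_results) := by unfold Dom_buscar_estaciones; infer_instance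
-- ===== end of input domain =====

-- B replaces A's two accumulator buckets by a one-pass rank-and-filter followed by a
-- stable sort on the rank (objective: alternative decomposition, same cost).

-- ===== PORT A =====
def buscar_estaciones (query : String) (estaciones : List (List (String × String))) (max_results : Int) : List (List (String × String)) :=
  if query == "" || PySem.Str.len query < 2 then []
  else
    let query_upper := PySem.Str.strip (PySem.Str.upper query)
    let acc := estaciones.foldl (fun (acc : List (List (String × String)) × List (List (String × String))) e =>
      let nombre := PySem.Str.upper ((PySem.Dict.mk e).getD "nom" "")
      let codigo := PySem.Str.upper ((PySem.Dict.mk e).getD "cod" "")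
      let codigo_old := PySem.Str.upper ((PySem.Dict.mk e).getD "cod_old" "")
      if codigo == query_upper || codigo_old == query_upper then (acc.1 ++ [e], acc.2)
      else if PySem.Str.startswith nombre query_upper then (acc.1 ++ [e], acc.2)
      else if PySem.Str.isIn query_upper nombre then (acc.1, acc.2 ++ [e])
      else acc) ([], [])
    let results := acc.1 ++ acc.2
    PySem.List.slice results none (some max_results)

-- ===== PORT B =====
-- B's relevance rank: 0 = exact code / name prefix, 1 = partial name match, 2 = no match
def bRank (query_upper : String) (e : List (String × String)) : Int :=
  let nombre := PySem.Str.upper ((PySem.Dict.mk e).getD "nom" "")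
  if PySem.Str.upper ((PySem.Dict.mk e).getD "cod" "") == query_upper
      || PySem.Str.upper ((PySem.Dict.mk e).getD "cod_old" "") == query_upper
      || PySem.Str.startswith nombre query_upper then 0
  else if PySem.Str.isIn query_upper nombre then 1
  else 2

def buscar_estaciones_alt (query : String) (estaciones : List (List (String × String))) (max_results : Int) : List (List (String × String)) :=
  if query == "" || PySem.Str.len query < 2 then []
  else
    let query_upper := PySem.Str.strip (PySem.Str.upper query)
    let matched := estaciones.filter (fun e => bRank query_upper e < 2)
    PySem.List.slice (PySem.List.sorted matched (bRank query_upper) false) none (some max_results)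

-- ===== PRECONDITION & SPEC =====
def Spec_buscar_estaciones (query : String) (estaciones : List (List (String × String))) (max_results : Int) (out : List (List (String × String))) : Prop := out = buscar_estaciones_alt query estaciones max_results
instance (query : String) (estaciones : List (List (String × String))) (max_results : Int) (out : List (List (String × String))) : Decidable (Spec_buscar_estaciones query estaciones max_results out) := by unfold Spec_buscar_estaciones; infer_instance

-- ===== CLAIM (what is proved, stated in full; the proofs are below) =====
def Claim_equal_buscar_estaciones : Prop := ∀ (query : String) (estaciones : List (List (String × String))) (max_results : Int), Dom_buscar_estaciones query estaciones max_results → Spec_buscar_estaciones query estaciones max_results (buscar_estaciones query estaciones max_results)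

-- ===== LEMMAS AND PROOFS =====

-- insertBy puts x in front when x goes before every element
theorem insertBy_all_before {α : Type} (before : α → α → Bool) (x : α) (ys : List α)
    (h : ∀ y ∈ ys, before x y = true) :
    PySem.List.insertBy before x ys = x :: ys := by
  cases ys with
  | nil => rfl
  | cons y t => simp [PySem.List.insertBy, h y (by simp)]

-- insertBy skips a prefix x does not go before
theorem insertBy_skip_prefix {α : Type} (before : α → α → Bool) (x : α) (f0 ys : List α)
    (h : ∀ y ∈ f0, before x y = false) :
    PySem.List.insertBy before x (f0 ++ ys) = f0 ++ PySem.List.insertBy before x ys := by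
  induction f0 with
  | nil => rfl
  | cons y t ih =>
      simp [PySem.List.insertBy, h y (by simp), ih (fun z hz => h z (by simp [hz]))]

-- stable insertion sort on a 0/1-valued key is "all 0s, then all 1s", each in input order
theorem sorted01 {α : Type} (k : α → Int) :
    ∀ (xs f0 f1 : List α), (∀ x ∈ xs, k x = 0 ∨ k x = 1) → (∀ y ∈ f0, k y = 0) → (∀ y ∈ f1, k y = 1) →
    xs.foldl (fun acc x => PySem.List.insertBy (fun a b => decide (k a < k b)) x acc) (f0 ++ f1)
      = (f0 ++ xs.filter (fun e => k e == 0)) ++ (f1 ++ xs.filter (fun e => k e == 1)) := by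
  intro xs
  induction xs with
  | nil => intro f0 f1 _ _ _; simp
  | cons x t ih =>
      intro f0 f1 hx h0 h1
      rcases hx x (by simp) with hk | hk
      · have step : PySem.List.insertBy (fun a b => decide (k a < k b)) x (f0 ++ f1)
            = (f0 ++ [x]) ++ f1 := by
          rw [insertBy_skip_prefix _ _ _ _ (fun y hy => by simp [hk, h0 y hy]),
              insertBy_all_before _ _ _ (fun y hy => by simp [hk, h1 y hy])]
          simp
        simp only [List.foldl_cons, step]
        rw [ih (f0 ++ [x]) f1 (fun z hz => hx z (by simp [hz]))
              (by intro y hy; rcases List.mem_append.1 hy with h | h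
                  · exact h0 y h
                  · simp at h; simpa [h] using hk) h1]
        simp [hk]
      · have step : PySem.List.insertBy (fun a b => decide (k a < k b)) x (f0 ++ f1)
            = f0 ++ (f1 ++ [x]) := by
          rw [PySem.List.insertBy_of_forall_not_before _ _ _ (by
            intro y hy
            rcases List.mem_append.1 hy with h | h
            · simp [hk, h0 y h]
            · simp [hk, h1 y h])]
          simp
        simp only [List.foldl_cons, step]
        rw [ih f0 (f1 ++ [x]) (fun z hz => hx z (by simp [hz])) h0
              (by intro y hy; rcases List.mem_append.1 hy with h | h
                  · exact h1 y h
                  · simp at h; simpa [h] using hk)]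
        simp [hk]

-- a two-bucket fold whose step is classify-by-rank, in the abstract
theorem foldGen {α : Type} (r : α → Int) (step : List α × List α → α → List α × List α)
    (hstep : ∀ acc e, step acc e
      = if r e = 0 then (acc.1 ++ [e], acc.2) else if r e = 1 then (acc.1, acc.2 ++ [e]) else acc) :
    ∀ (es : List α) (ex pa : List α),
    es.foldl step (ex, pa)
      = (ex ++ es.filter (fun e => r e == 0), pa ++ es.filter (fun e => r e == 1)) := by
  intro es
  induction es with
  | nil => intro ex pa; simp
  | cons e t ih =>
      intro ex pa
      rw [List.foldl_cons, hstep]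
      by_cases h0 : r e = 0
      · rw [if_pos h0, ih]
        simp [h0]
      · by_cases h1 : r e = 1
        · rw [if_neg h0, if_pos h1, ih]
          simp [h1]
        · rw [if_neg h0, if_neg h1, ih]
          simp [h0, h1]

-- A's loop body is classify-by-bRank
theorem stepA_rank (qu : String) :
    ∀ (acc : List (List (String × String)) × List (List (String × String))) (e : List (String × String)),
    (fun (acc : List (List (String × String)) × List (List (String × String))) e =>
      let nombre := PySem.Str.upper ((PySem.Dict.mk e).getD "nom" "")
      let codigo := PySem.Str.upper ((PySem.Dict.mk e).getD "cod" "")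
      let codigo_old := PySem.Str.upper ((PySem.Dict.mk e).getD "cod_old" "")
      if codigo == qu || codigo_old == qu then (acc.1 ++ [e], acc.2)
      else if PySem.Str.startswith nombre qu then (acc.1 ++ [e], acc.2)
      else if PySem.Str.isIn qu nombre then (acc.1, acc.2 ++ [e])
      else acc) acc e
    = (if bRank qu e = 0 then (acc.1 ++ [e], acc.2)
       else if bRank qu e = 1 then (acc.1, acc.2 ++ [e])
       else acc) := by
  intro acc e
  simp only [bRank]
  by_cases h1 : (PySem.Str.upper ((PySem.Dict.mk e).getD "cod" "") == qu) = true <;>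
  by_cases h2 : (PySem.Str.upper ((PySem.Dict.mk e).getD "cod_old" "") == qu) = true <;>
  by_cases h3 : PySem.Str.startswith (PySem.Str.upper ((PySem.Dict.mk e).getD "nom" "")) qu = true <;>
  by_cases h4 : PySem.Str.isIn qu (PySem.Str.upper ((PySem.Dict.mk e).getD "nom" "")) = true <;>
  simp_all

-- every rank is 0, 1 or 2
theorem bRank_cases (qu : String) (e : List (String × String)) :
    bRank qu e = 0 ∨ bRank qu e = 1 ∨ bRank qu e = 2 := by
  simp only [bRank]
  split_ifs <;> simp

-- B's sorted matched list is exactly "rank-0 elements, then rank-1 elements"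
theorem sorted_matched_eq (qu : String) (es : List (List (String × String))) :
    PySem.List.sorted (es.filter (fun e => bRank qu e < 2)) (bRank qu) false
      = es.filter (fun e => bRank qu e == 0) ++ es.filter (fun e => bRank qu e == 1) := by
  rw [PySem.List.sorted_eq_foldl_insertBy]
  have h := sorted01 (bRank qu) (es.filter (fun e => decide (bRank qu e < 2))) [] []
    (by intro x hx
        have hm := List.of_mem_filter hx
        rcases bRank_cases qu x with h | h | h
        · exact Or.inl h
        · exact Or.inr h
        · simp [h] at hm)
    (by simp) (by simp)
  simp only [List.nil_append, List.append_nil] at h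
  rw [h]
  congr 1
  · rw [List.filter_filter]
    apply List.filter_congr
    intro x _
    by_cases h : bRank qu x = 0 <;> simp [h]
  · rw [List.filter_filter]
    apply List.filter_congr
    intro x _
    by_cases h : bRank qu x = 1 <;> simp [h]

-- ===== VERDICT (by name: the statement is the Claim_ definition above) =====
theorem buscar_estaciones_spec : Claim_equal_buscar_estaciones := by
  intro query estaciones max_results _
  unfold Spec_buscar_estaciones buscar_estaciones buscar_estaciones_alt
  cases hg : (query == "" || decide (PySem.Str.len query < 2)) with
  | true => simp
  | false =>
      simp only [Bool.false_eq_true, if_false]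
      rw [foldGen (bRank (PySem.Str.strip (PySem.Str.upper query))) _
            (stepA_rank (PySem.Str.strip (PySem.Str.upper query))) estaciones [] [],
          sorted_matched_eq]
      simp
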